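-- pv_equiv track=rewrite | github.com/homerquan/VeriEdit | src/veriedit/agents/planner.py | _blocked_tools_from_history
-- ===== SOURCE A (Python) =====
-- from typing import Any
--
-- def _blocked_tools_from_history(executed_steps: list[dict[str, Any]]) -> set[str]:
--     blocked: set[str] = set()
--     outcomes: dict[str, list[str]] = {}
--     for step in executed_steps:
--         outcomes.setdefault(step["tool"], []).append(step["status"])
--     for tool, statuses in outcomes.items():
--         if statuses and all(status == "rolled_back" for status in statuses):
--             blocked.add(tool)
--     return blocked
-- ===== SOURCE B (Python) =====
-- def _blocked_tools_from_history(executed_steps):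
--     seen: set[str] = set()
--     has_other: set[str] = set()
--     for step in executed_steps:
--         tool = step["tool"]
--         seen.add(tool)
--         if step["status"] != "rolled_back":
--             has_other.add(tool)
--     return seen - has_other
-- ===== Notes on version B (the rewrite author's own statement) =====
-- stated objective: simpler
-- what changed: One pass maintaining two membership sets (seen and has_other) followed by a set difference, instead of grouping per-tool status lists in a dict and a second all()-scan over them.
import Mathlib
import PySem

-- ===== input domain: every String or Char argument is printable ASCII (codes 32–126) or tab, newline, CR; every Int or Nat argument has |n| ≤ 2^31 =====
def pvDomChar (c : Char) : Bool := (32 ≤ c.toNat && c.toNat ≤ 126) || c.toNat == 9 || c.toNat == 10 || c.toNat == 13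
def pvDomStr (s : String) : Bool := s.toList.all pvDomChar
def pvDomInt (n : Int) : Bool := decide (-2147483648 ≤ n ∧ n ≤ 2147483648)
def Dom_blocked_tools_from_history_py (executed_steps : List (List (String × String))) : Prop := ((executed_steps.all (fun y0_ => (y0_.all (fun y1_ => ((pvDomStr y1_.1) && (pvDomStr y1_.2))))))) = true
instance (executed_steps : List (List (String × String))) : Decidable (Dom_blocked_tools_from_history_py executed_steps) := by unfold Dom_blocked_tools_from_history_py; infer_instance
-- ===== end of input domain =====

-- B replaces A's dict of per-tool status lists + second all()-pass by one pass over two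
-- membership sets and a set difference (objective: simpler). Return-value equivalence only.

-- ===== PORT A =====
-- step["tool"] / step["status"] are total here via getD ""; Pre_ excludes steps missing
-- either key, exactly where Python raises KeyError.
def blocked_tools_from_history_py (executed_steps : List (List (String × String))) : List String :=
  let outcomes : PySem.Dict String (List String) :=
    executed_steps.foldl
      (fun d step =>
        d.modify ((PySem.Dict.mk step).getD "tool" "") []
          (fun v => v ++ [(PySem.Dict.mk step).getD "status" ""]))
      PySem.Dict.empty
  outcomes.items.foldl
    (fun blocked p =>
      if !p.2.isEmpty && p.2.all (fun status => status == "rolled_back")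
      then PySem.Set.add blocked p.1 else blocked)
    PySem.Set.empty

-- ===== PORT B =====
def blocked_tools_from_history_py_alt (executed_steps : List (List (String × String))) : List String :=
  let final := executed_steps.foldl
    (fun (acc : PySem.Set String × PySem.Set String) step =>
      let tool := (PySem.Dict.mk step).getD "tool" ""
      ( PySem.Set.add acc.1 tool,
        if (PySem.Dict.mk step).getD "status" "" ≠ "rolled_back"
        then PySem.Set.add acc.2 tool else acc.2 ))
    (PySem.Set.empty, PySem.Set.empty)
  PySem.Set.diff final.1 final.2

-- ===== PRECONDITION & SPEC =====
-- Pre_ excludes only steps that lack a "tool" or "status" key, on which Python A raises KeyError.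
def Pre_blocked_tools_from_history_py (executed_steps : List (List (String × String))) : Prop :=
  (executed_steps.all (fun step =>
    (PySem.Dict.mk step).contains "tool" && (PySem.Dict.mk step).contains "status")) = true
instance (executed_steps : List (List (String × String))) : Decidable (Pre_blocked_tools_from_history_py executed_steps) := by unfold Pre_blocked_tools_from_history_py; infer_instance

def pvWitness_blocked_tools_from_history_py : (List (List (String × String))) :=
  [[("tool", "t1"), ("status", "rolled_back")], [("tool", "t2"), ("status", "done")]]

def Spec_blocked_tools_from_history_py (executed_steps : List (List (String × String))) (out : List String) : Prop := out = blocked_tools_from_history_py_alt executed_steps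
instance (executed_steps : List (List (String × String))) (out : List String) : Decidable (Spec_blocked_tools_from_history_py executed_steps out) := by unfold Spec_blocked_tools_from_history_py; infer_instance

-- ===== CLAIM (what is proved, stated in full; the proofs are below) =====
def Claim_equal_blocked_tools_from_history_py : Prop := ∀ (executed_steps : List (List (String × String))), Dom_blocked_tools_from_history_py executed_steps → Pre_blocked_tools_from_history_py executed_steps → Spec_blocked_tools_from_history_py executed_steps (blocked_tools_from_history_py executed_steps)

-- ===== LEMMAS AND PROOFS =====

-- abbreviations used only by the proofs
def pvTool (step : List (String × String)) : String := (PySem.Dict.mk step).getD "tool" ""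
def pvStatus (step : List (String × String)) : String := (PySem.Dict.mk step).getD "status" ""

-- a fold adding elements of a Nodup list when a predicate holds is a filter
theorem pv_foldl_add_if {cond : String → Bool} (l : List String) (acc : PySem.Set String)
    (hnd : l.Nodup) (hdisj : ∀ k ∈ l, k ∉ acc) :
    l.foldl (fun b k => if cond k then PySem.Set.add b k else b) acc
      = acc ++ l.filter cond := by
  induction l generalizing acc with
  | nil => simp
  | cons hd tl ih =>
    have hhd : hd ∉ acc := hdisj hd (by simp)
    have hndtl : tl.Nodup := hnd.of_cons
    have hhdtl : hd ∉ tl := by simp [List.nodup_cons] at hnd; exact hnd.1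
    simp only [List.foldl_cons, List.filter_cons]
    by_cases hc : cond hd
    · have hadd : PySem.Set.add acc hd = acc ++ [hd] := by
        simp [PySem.Set.add, PySem.Set.contains]
        intro h; exact absurd h hhd
      have hdisj2 : ∀ k ∈ tl, k ∉ acc ++ [hd] := by
        intro k hk
        simp only [List.mem_append, List.mem_singleton]
        rintro (h | rfl)
        · exact hdisj k (by simp [hk]) h
        · exact hhdtl hk
      rw [hc, if_pos rfl, hadd, ih (acc ++ [hd]) hndtl hdisj2]
      simp
    · rw [if_neg (by simp [hc]), ih acc hndtl (fun k hk h => hdisj k (by simp [hk]) h)]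
      simp [hc]

-- B's loop invariant: the two sets after the fold
theorem pv_B_fold (xs : List (List (String × String))) (s1 s2 : PySem.Set String) :
    xs.foldl
      (fun (acc : PySem.Set String × PySem.Set String) step =>
        let tool := (PySem.Dict.mk step).getD "tool" ""
        ( PySem.Set.add acc.1 tool,
          if (PySem.Dict.mk step).getD "status" "" ≠ "rolled_back"
          then PySem.Set.add acc.2 tool else acc.2 ))
      (s1, s2)
      = (PySem.Set.update s1 (xs.map pvTool),
         PySem.Set.update s2 ((xs.filter (fun st => pvStatus st ≠ "rolled_back")).map pvTool)) := by
  induction xs generalizing s1 s2 with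
  | nil => simp [PySem.Set.update]
  | cons hd tl ih =>
    simp only [List.foldl_cons, ih, List.map_cons, List.filter_cons]
    by_cases h : pvStatus hd = "rolled_back"
    · simp only [pvStatus] at h
      simp [PySem.Set.update, pvTool, pvStatus, h]
    · simp only [pvStatus] at h
      simp [PySem.Set.update, pvTool, pvStatus, h]

theorem pv_main (xs : List (List (String × String))) :
    blocked_tools_from_history_py xs = blocked_tools_from_history_py_alt xs := by
  -- rewrite A's grouping fold as a fold over (tool, status) pairs
  have hfold :
      xs.foldl
        (fun d step =>
          d.modify ((PySem.Dict.mk step).getD "tool" "") []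
            (fun v => v ++ [(PySem.Dict.mk step).getD "status" ""]))
        PySem.Dict.empty
      = (xs.map (fun st => (pvTool st, pvStatus st))).foldl
          (fun d p => d.modify p.1 [] (fun v => v ++ [p.2])) PySem.Dict.empty := by
    rw [List.foldl_map]; rfl
  set pairs := xs.map (fun st => (pvTool st, pvStatus st)) with hpairs
  set outcomes := pairs.foldl (fun d p => d.modify p.1 [] (fun v => v ++ [p.2]))
      (PySem.Dict.empty : PySem.Dict String (List String)) with houtc
  have hkeys : outcomes.keys = PySem.Set.ofList (xs.map pvTool) := by
    rw [houtc]
    have := PySem.Dict.keys_foldl_modify_key pairs (fun p => p.1) []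
      (fun _ p v => v ++ [p.2]) (PySem.Dict.empty : PySem.Dict String (List String))
    simp only at this
    rw [this]
    simp only [PySem.Set.update, PySem.Set.ofList, PySem.Dict.keys, PySem.Dict.empty,
      List.map_map, List.map_nil, hpairs]
    rfl
  have hnodup : outcomes.keys.Nodup := by
    rw [hkeys]; exact PySem.Set.nodup_ofList _
  have hgetD : ∀ k, outcomes.getD k []
      = (pairs.filter (fun p => p.1 == k)).map (fun p => p.2) := by
    intro k
    rw [houtc, PySem.Dict.getD_foldl_modify_append]
    simp [PySem.Dict.empty, PySem.Dict.getD, PySem.Dict.get?]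
  -- A = fold over keys
  have hA : blocked_tools_from_history_py xs
      = (PySem.Set.ofList (xs.map pvTool)).filter
          (fun k => !((pairs.filter (fun p => p.1 == k)).map (fun p => p.2)).isEmpty
            && ((pairs.filter (fun p => p.1 == k)).map (fun p => p.2)).all
                 (fun status => status == "rolled_back")) := by
    show (xs.foldl _ PySem.Dict.empty).items.foldl _ PySem.Set.empty = _
    rw [hfold, PySem.Dict.items_eq_map_keys outcomes hnodup [], List.foldl_map]
    simp only [hgetD]
    rw [hkeys]
    exact pv_foldl_add_if _ _ (PySem.Set.nodup_ofList _) (by simp [PySem.Set.empty])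
  -- B = set difference over the same key list
  have hB : blocked_tools_from_history_py_alt xs
      = (PySem.Set.ofList (xs.map pvTool)).filter
          (fun k => !(PySem.Set.ofList
              ((xs.filter (fun st => pvStatus st ≠ "rolled_back")).map pvTool)).contains k) := by
    show PySem.Set.diff (xs.foldl _ (PySem.Set.empty, PySem.Set.empty)).1 _ = _
    rw [pv_B_fold]
    rfl
  rw [hA, hB]
  apply List.filter_congr
  intro k hk
  have hkmem : k ∈ xs.map pvTool := (PySem.Set.mem_ofList _ _).mp hk
  -- both conditions say: every step with tool k has status "rolled_back"
  have hmemB : (PySem.Set.ofList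
      ((xs.filter (fun st => pvStatus st ≠ "rolled_back")).map pvTool)).contains k
      = decide (∃ st ∈ xs, pvTool st = k ∧ pvStatus st ≠ "rolled_back") := by
    simp only [PySem.Set.contains]
    rw [Bool.eq_iff_iff]
    simp only [List.contains_iff_mem, decide_eq_true_eq]
    rw [PySem.Set.mem_ofList]
    simp only [List.mem_map, List.mem_filter]
    constructor
    · rintro ⟨st, ⟨hst, hne⟩, rfl⟩
      exact ⟨st, hst, rfl, by simpa using hne⟩
    · rintro ⟨st, hst, rfl, hne⟩
      exact ⟨st, ⟨hst, by simpa using hne⟩, rfl⟩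
  rw [hmemB, hpairs]
  simp only [List.filter_map, List.map_map, Function.comp_def]
  obtain ⟨st0, hst0, hst0k⟩ := List.mem_map.mp hkmem
  rw [Bool.eq_iff_iff]
  simp only [Bool.and_eq_true, Bool.not_eq_true', List.isEmpty_eq_false_iff,
    List.all_eq_true, decide_eq_false_iff_not]
  constructor
  · rintro ⟨hne0, hall⟩ ⟨st, hst, hkeq, hne⟩
    apply hne
    have hmem : pvStatus st ∈ List.map (fun st => pvStatus st)
        (List.filter (fun st => pvTool st == k) xs) :=
      List.mem_map.mpr ⟨st, List.mem_filter.mpr ⟨hst, by simp [hkeq]⟩, rfl⟩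
    simpa using hall (pvStatus st) hmem
  · intro hnone
    refine ⟨?_, ?_⟩
    · apply List.ne_nil_of_mem
      exact List.mem_map.mpr ⟨st0, List.mem_filter.mpr ⟨hst0, by simp [hst0k]⟩, rfl⟩
    · intro s hs
      obtain ⟨st, hstmem, rfl⟩ := List.mem_map.mp hs
      obtain ⟨hst, hkeq⟩ := List.mem_filter.mp hstmem
      simp only [beq_iff_eq] at hkeq ⊢
      by_contra hne
      exact hnone ⟨st, hst, hkeq, hne⟩
-- ===== VERDICT (by name: the statement is the Claim_ definition above) =====
theorem blocked_tools_from_history_py_spec : Claim_equal_blocked_tools_from_history_py := by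
  intro xs _ _
  exact pv_main xs
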